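-- pv_equiv track=rewrite | github.com/thanhchauns2/Python_PTIT | SoThuanNghichChan.py | check
-- ===== SOURCE A (Python) =====
-- def check(n):
--     m = "".join(reversed(str(n)))
--     if(len(m)%2!=0):
--         return False
--     for i in range(0,len(m)):
--         if m[i]!=str(0) and m[i]!=str(2) and m[i]!=str(4) and m[i]!=str(6) and m[i] != str(8):
--             return False
--     if m == str(n):
--         return True
--     return False
-- ===== SOURCE B (Python) =====
-- def check(n):
--     # Pure arithmetic: reverse n digit by digit, testing digit parity and
--     # counting digits along the way; no string is ever built.
--     if n <= 0:
--         return False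
--     rev, x, cnt = 0, n, 0
--     while x > 0:
--         x, d = divmod(x, 10)
--         if d % 2 != 0:
--             return False
--         rev = rev * 10 + d
--         cnt += 1
--     return cnt % 2 == 0 and rev == n
-- ===== Notes on version B (the rewrite author's own statement) =====
-- stated objective: alternative
-- what changed: B replaces A's string pipeline (build str(n), build the reversed string, scan it for even digit characters, compare the two strings) by a purely arithmetic divmod loop that reverses n digit by digit while testing digit parity and counting digits, never constructing a string.
import Mathlib
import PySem

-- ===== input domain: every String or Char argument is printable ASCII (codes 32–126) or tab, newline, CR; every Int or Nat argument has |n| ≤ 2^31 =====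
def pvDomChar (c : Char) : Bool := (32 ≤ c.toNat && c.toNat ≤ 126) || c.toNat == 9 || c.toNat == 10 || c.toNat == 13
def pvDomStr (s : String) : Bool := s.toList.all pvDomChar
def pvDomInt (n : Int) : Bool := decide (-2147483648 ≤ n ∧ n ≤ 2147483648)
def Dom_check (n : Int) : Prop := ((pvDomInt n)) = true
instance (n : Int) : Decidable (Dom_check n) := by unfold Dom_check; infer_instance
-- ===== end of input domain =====

-- B replaces A's string pipeline (reversed-string build, even-digit character scan,
-- string comparison) by a purely arithmetic divmod loop that reverses n digit by digit
-- while testing digit parity and counting digits; no string is built.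

-- ===== PORT A =====
-- the 'for i in range(0, len(m))' loop of A: early 'return False' on a non-even-digit char
def checkLoopA : List Char → Bool
  | [] => true
  | c :: rest =>
    if c ≠ '0' ∧ c ≠ '2' ∧ c ≠ '4' ∧ c ≠ '6' ∧ c ≠ '8' then false
    else checkLoopA rest

def check (n : Int) : Bool :=
  let s := PySem.Int.toChars n
  let m := s.reverse               -- "".join(reversed(str(n)))
  if m.length % 2 ≠ 0 then false
  else if checkLoopA m = false then false
  else if m = s then true
  else false

-- ===== PORT B =====
-- termination helper for the 'while x > 0' loop: x // 10 strictly shrinks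
theorem bLoop_dec (x : Int) (h : 0 < x) : (PySem.Int.floordiv x 10).toNat < x.toNat := by
  have : PySem.Int.floordiv x 10 = x / 10 := by
    simp [PySem.Int.floordiv, Int.fdiv_eq_ediv]
  rw [this]
  omega

-- the 'while x > 0' loop of B; none = early 'return False' on an odd digit,
-- some (rev, cnt) = loop finished with these accumulator values
def bLoop (x rev cnt : Int) : Option (Int × Int) :=
  if h : 0 < x then
    let x' := PySem.Int.floordiv x 10
    let d := PySem.Int.mod x 10
    if PySem.Int.mod d 2 ≠ 0 then none
    else bLoop x' (rev * 10 + d) (cnt + 1)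
  else some (rev, cnt)
termination_by x.toNat
decreasing_by exact bLoop_dec x h

def check_alt (n : Int) : Bool :=
  if n ≤ 0 then false
  else
    match bLoop n 0 0 with
    | none => false
    | some (rev, cnt) => (PySem.Int.mod cnt 2 == 0) && (rev == n)

-- ===== PRECONDITION & SPEC =====
def Spec_check (n : Int) (out : Bool) : Prop := out = check_alt n
instance (n : Int) (out : Bool) : Decidable (Spec_check n out) := by unfold Spec_check; infer_instance

-- ===== CLAIM =====
def Claim_equal_check : Prop := ∀ (n : Int), Dom_check n → Spec_check n (check n)

-- ===== LEMMAS AND PROOFS =====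

def evDigit (c : Char) : Bool := c = '0' ∨ c = '2' ∨ c = '4' ∨ c = '6' ∨ c = '8'

theorem checkLoopA_eq_all (l : List Char) : checkLoopA l = l.all evDigit := by
  induction l with
  | nil => rfl
  | cons c rest ih =>
    simp only [checkLoopA, List.all_cons]
    by_cases hev : c = '0' ∨ c = '2' ∨ c = '4' ∨ c = '6' ∨ c = '8'
    · rw [if_neg (by tauto)]
      have : evDigit c = true := by simp only [evDigit]; exact decide_eq_true hev
      simp [this, ih]
    · rw [if_pos (by tauto)]
      have : evDigit c = false := by simp only [evDigit]; exact decide_eq_false hev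
      simp [this]

-- Nat.toDigits agrees with Nat.digits (big-endian, as characters), for positive n
theorem toDigitsCore_eq (f : Nat) : ∀ (n : Nat) (l : List Char), 0 < n → n < f →
    Nat.toDigitsCore 10 f n l = ((Nat.digits 10 n).map Nat.digitChar).reverse ++ l := by
  induction f with
  | zero => intro n l h1 h2; omega
  | succ f ih =>
    intro n l h1 h2
    rw [Nat.digits_def' (by norm_num) h1]
    simp only [Nat.toDigitsCore, List.map_cons, List.reverse_cons]
    by_cases hz : n / 10 = 0
    · simp [hz, Nat.digits_zero]
    · rw [if_neg hz, ih (n / 10) _ (by omega) (by omega)]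
      simp

theorem toDigits_eq (n : Nat) (h : 0 < n) :
    Nat.toDigits 10 n = ((Nat.digits 10 n).map Nat.digitChar).reverse := by
  have := toDigitsCore_eq (n + 1) n [] h (by omega)
  simpa [Nat.toDigits] using this

-- digitChar of a decimal digit is an even-digit character iff the digit is even
theorem evDigit_digitChar (d : Nat) (hd : d < 10) :
    evDigit (Nat.digitChar d) = decide (d % 2 = 0) := by
  interval_cases d <;> decide

-- digitChar is injective on decimal digits
theorem digitChar_inj (d e : Nat) (hd : d < 10) (he : e < 10)
    (h : Nat.digitChar d = Nat.digitChar e) : d = e := by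
  interval_cases d <;> interval_cases e <;> simp_all <;> exact absurd h (by decide)

-- ofDigits is injective on digit lists of equal length
theorem ofDigits_inj : ∀ (l1 l2 : List Nat), l1.length = l2.length →
    (∀ d ∈ l1, d < 10) → (∀ d ∈ l2, d < 10) →
    Nat.ofDigits 10 l1 = Nat.ofDigits 10 l2 → l1 = l2 := by
  intro l1
  induction l1 with
  | nil => intro l2 hlen _ _ _; cases l2 <;> simp_all
  | cons d t ih =>
    intro l2 hlen h1 h2 heq
    cases l2 with
    | nil => simp at hlen
    | cons e t2 =>
      simp only [Nat.ofDigits_cons] at heq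
      have hd : d < 10 := h1 d (by simp)
      have he : e < 10 := h2 e (by simp)
      have hde : d = e := by omega
      have ht : Nat.ofDigits 10 t = Nat.ofDigits 10 t2 := by
        omega
      have := ih t2 (by simpa using hlen) (fun x hx => h1 x (by simp [hx]))
        (fun x hx => h2 x (by simp [hx])) ht
      simp [hde, this]

-- mapping digitChar over decimal-digit lists is injective
theorem map_digitChar_inj : ∀ (l1 l2 : List Nat), (∀ d ∈ l1, d < 10) → (∀ d ∈ l2, d < 10) →
    l1.map Nat.digitChar = l2.map Nat.digitChar → l1 = l2 := by
  intro l1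
  induction l1 with
  | nil => intro l2 _ _ h; cases l2 <;> simp_all
  | cons d t ih =>
    intro l2 h1 h2 h
    cases l2 with
    | nil => simp at h
    | cons e t2 =>
      simp only [List.map_cons, List.cons.injEq] at h
      have hde := digitChar_inj d e (h1 d (by simp)) (h2 e (by simp)) h.1
      have := ih t2 (fun x hx => h1 x (by simp [hx])) (fun x hx => h2 x (by simp [hx])) h.2
      simp [hde, this]

theorem all_ev_map (L : List Nat) (h : ∀ d ∈ L, d < 10) :
    (L.map Nat.digitChar).all evDigit = L.all (fun d => decide (d % 2 = 0)) := by
  induction L with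
  | nil => rfl
  | cons d t ih =>
    simp only [List.map_cons, List.all_cons]
    rw [evDigit_digitChar d (h d (by simp)), ih (fun e he => h e (by simp [he]))]

-- the loop of B, characterised through Nat.digits
theorem bLoop_spec : ∀ (k : Nat) (x rev cnt : Int), x.toNat = k → 0 < x →
    bLoop x rev cnt =
      (if (Nat.digits 10 x.toNat).all (fun d => decide (d % 2 = 0)) then
        some (rev * (10 : Int) ^ (Nat.digits 10 x.toNat).length
                + ((Nat.ofDigits (10:Nat) (Nat.digits 10 x.toNat).reverse : Nat) : Int),
              cnt + (Nat.digits 10 x.toNat).length)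
      else none) := by
  intro k
  induction k using Nat.strong_induction_on with
  | _ k ih =>
    intro x rev cnt hk hx
    have hfd : PySem.Int.floordiv x 10 = ((x.toNat / 10 : Nat) : Int) := by
      have h1 : Int.fdiv x 10 = x / 10 := by rw [Int.fdiv_eq_ediv]; norm_num
      rw [PySem.Int.floordiv, h1]
      omega
    have hmd : PySem.Int.mod x 10 = ((x.toNat % 10 : Nat) : Int) := by
      have h1 : Int.fmod x 10 = x % 10 := by rw [Int.fmod_eq_emod]; norm_num
      rw [PySem.Int.mod, h1]
      omega
    have hpar : PySem.Int.mod (((x.toNat % 10 : Nat) : Int)) 2 =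
        ((x.toNat % 10 % 2 : Nat) : Int) := by
      have h1 : Int.fmod ((x.toNat % 10 : Nat) : Int) 2 = ((x.toNat % 10 : Nat) : Int) % 2 := by
        rw [Int.fmod_eq_emod]; norm_num
      rw [PySem.Int.mod, h1]
      omega
    have hdig := Nat.digits_def' (b := 10) (by norm_num) (n := x.toNat) (by omega)
    rw [bLoop, dif_pos hx, hdig]
    simp only [hmd, hpar, hfd, List.all_cons]
    by_cases hodd : x.toNat % 10 % 2 = 0
    · rw [if_neg (by push_cast; omega)]
      have hd0 : (decide (x.toNat % 10 % 2 = 0)) = true := decide_eq_true hodd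
      by_cases hz : x.toNat / 10 = 0
      · rw [bLoop, dif_neg (by rw [hz]; simp)]
        rw [if_pos (by simp [hz]; omega)]
        simp only [hz, Nat.digits_zero, List.length_cons, List.length_nil,
          List.reverse_cons, List.reverse_nil, List.nil_append, Nat.ofDigits_singleton,
          Option.some.injEq, Prod.mk.injEq]
        constructor
        · norm_num
        · push_cast; ring
      · have hx' : (0 : Int) < ((x.toNat / 10 : Nat) : Int) := by omega
        rw [ih (x.toNat / 10) (by omega) _ _ _ (by omega) hx']
        rw [show (((x.toNat / 10 : Nat) : Int)).toNat = x.toNat / 10 by omega]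
        by_cases hall : (Nat.digits 10 (x.toNat / 10)).all (fun d => decide (d % 2 = 0)) = true
        · rw [if_pos hall, if_pos (by simp [hall]; omega)]
          simp only [List.length_cons, List.reverse_cons, Option.some.injEq, Prod.mk.injEq]
          constructor
          · rw [Nat.ofDigits_append, Nat.ofDigits_singleton, List.length_reverse]
            generalize (Nat.digits 10 (x.toNat / 10)).length = m
            generalize x.toNat % 10 = d
            push_cast [pow_succ]
            ring
          · push_cast; ring
        · rw [if_neg hall,
            if_neg (by rw [Bool.and_eq_true]; exact fun h => hall h.2)]
    · rw [if_pos (by push_cast; omega),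
        if_neg (by rw [Bool.and_eq_true]; exact fun h => hodd (of_decide_eq_true h.1))]

-- even-length / all-even-digit / palindrome characterisation links A and B for positive n
theorem main_pos (n : Int) (hn : 0 < n) : check n = check_alt n := by
  have hn0 : 0 < n.toNat := by omega
  set L := Nat.digits 10 n.toNat with hLdef
  have hL10 : ∀ d ∈ L, d < 10 := fun d hd => Nat.digits_lt_base (by norm_num) hd
  have hLr10 : ∀ d ∈ L.reverse, d < 10 := fun d hd => hL10 d (List.mem_reverse.mp hd)
  have hs : PySem.Int.toChars n = (L.map Nat.digitChar).reverse := by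
    rw [PySem.Int.toChars, if_neg (by omega), toDigits_eq n.toNat hn0]
  have hofd : Nat.ofDigits 10 L = n.toNat := Nat.ofDigits_digits 10 n.toNat
  have hB := bLoop_spec n.toNat n 0 0 rfl hn
  rw [check_alt, if_neg (by omega), hB]
  simp only [← hLdef]
  simp only [check, hs, List.reverse_reverse, List.length_map]
  by_cases hall : L.all (fun d => decide (d % 2 = 0)) = true
  · rw [if_pos hall]
    have hloopA : checkLoopA (L.map Nat.digitChar) = true := by
      rw [checkLoopA_eq_all, all_ev_map L hL10, hall]
    have hcnt : PySem.Int.mod ((L.length : Nat) : Int) 2 = ((L.length % 2 : Nat) : Int) := by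
      have h1 : Int.fmod ((L.length : Nat) : Int) 2 = ((L.length : Nat) : Int) % 2 := by
        rw [Int.fmod_eq_emod]; norm_num
      rw [PySem.Int.mod, h1]
      omega
    by_cases hlen : L.length % 2 = 0
    · rw [if_neg (by omega), hloopA, if_neg (by simp)]
      by_cases hpal : L.map Nat.digitChar = (L.map Nat.digitChar).reverse
      · rw [if_pos hpal]
        have hLL : L.reverse = L := by
          apply map_digitChar_inj L.reverse L hLr10 hL10
          rw [List.map_reverse]
          exact hpal.symm
        have hb : (((Nat.ofDigits (10:Nat) L.reverse : Nat) : Int) == n) = true :=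
          beq_iff_eq.mpr (by rw [hLL, hofd]; omega)
        simp [hb]
        omega
      · rw [if_neg hpal]
        have hne : ¬ L.reverse = L := fun h => hpal (by rw [← List.map_reverse, h])
        have hb : (((Nat.ofDigits (10:Nat) L.reverse : Nat) : Int) == n) = false := by
          simp only [beq_eq_false_iff_ne, ne_eq]
          intro h
          exact hne (ofDigits_inj L.reverse L (by simp) hLr10 hL10 (by rw [hofd]; omega))
        simp [hb]
    · rw [if_pos (by omega)]
      simp
      intro hd
      exfalso
      omega
  · rw [if_neg hall]
    have hloopA : checkLoopA (L.map Nat.digitChar) = false := by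
      rw [checkLoopA_eq_all, all_ev_map L hL10]
      simpa using hall
    rw [hloopA]
    split_ifs <;> simp_all

theorem main_eq (n : Int) : check n = check_alt n := by
  rcases lt_trichotomy n 0 with hneg | hz | hpos
  · -- negative n: the '-' character makes both the digit scan and the palindrome test fail
    rw [check_alt, if_pos (by omega)]
    have hs : PySem.Int.toChars n = '-' :: Nat.toDigits 10 n.natAbs := by
      rw [PySem.Int.toChars, if_pos hneg]
    have hmem : '-' ∈ (PySem.Int.toChars n).reverse := by
      rw [hs]; simp
    have hloopA : checkLoopA (PySem.Int.toChars n).reverse = false := by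
      rw [checkLoopA_eq_all, Bool.eq_false_iff, ne_eq, List.all_eq_true]
      intro h
      have := h '-' hmem
      simp [evDigit] at this
    simp only [check]
    rw [hloopA]
    split_ifs <;> simp_all
  · subst hz; decide
  · exact main_pos n hpos

-- ===== VERDICT =====
theorem check_spec : Claim_equal_check := by
  intro n _
  unfold Spec_check
  exact main_eq n
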